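-- pv_equiv track=rewrite | github.com/OxNihil/LaCripta | Criptografía/kasiski.py | frequency_distance_repeat
-- ===== SOURCE A (Python) =====
-- import sys,math
-- from itertools import combinations
--
-- def frequency_distance_repeat(tuples):
--     frequency_len = {}
--     distancias = []
--     for i in range(len(tuples)):
--         distancias.append(tuples[i][1])
--     comb = combinations(distancias,2)
--     for i in list(comb):
--         gcd = math.gcd(i[0],i[1])
--         if gcd not in frequency_len and gcd > 1:
--             frequency_len[gcd] = 1
--         else:
--             if gcd > 1:
--                 frequency_len[gcd] = frequency_len[gcd]+1
--     return frequency_len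
-- ===== SOURCE B (Python) =====
-- import math
--
-- def frequency_distance_repeat(tuples):
--     # Recursion on the list structure: the head's row of gcds is counted into a
--     # small dict, then merged with the recursive result for the tail.
--     def freqs(ds):
--         if len(ds) < 2:
--             return {}
--         x, rest = ds[0], ds[1:]
--         row = {}
--         for y in rest:
--             g = math.gcd(x, y)
--             if g > 1:
--                 row[g] = row.get(g, 0) + 1
--         for g, c in freqs(rest).items():
--             row[g] = row.get(g, 0) + c
--         return row
--     return freqs([d for _, d in tuples])
-- ===== Notes on version B (the rewrite author's own statement) =====
-- stated objective: alternative
-- what changed: A materialises the full combinations list and runs one flat loop with explicit membership branches over a single global dict; B recurses on the list structure, counting each head's row into a fresh dict and merging per-key sums of the recursive result, with no membership test.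
import Mathlib
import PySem

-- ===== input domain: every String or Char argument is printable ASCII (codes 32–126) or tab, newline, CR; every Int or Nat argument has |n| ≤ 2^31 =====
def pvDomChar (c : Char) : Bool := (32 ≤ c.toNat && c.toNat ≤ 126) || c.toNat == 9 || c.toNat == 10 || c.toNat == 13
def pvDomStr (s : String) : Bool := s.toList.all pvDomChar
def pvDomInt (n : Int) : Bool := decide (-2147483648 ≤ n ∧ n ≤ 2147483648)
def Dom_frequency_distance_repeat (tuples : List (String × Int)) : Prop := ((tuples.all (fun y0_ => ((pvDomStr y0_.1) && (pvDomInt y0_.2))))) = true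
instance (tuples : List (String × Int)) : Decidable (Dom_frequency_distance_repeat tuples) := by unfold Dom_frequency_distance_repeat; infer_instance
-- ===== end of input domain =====

-- B replaces A's flat loop over the materialised combinations list (with explicit
-- membership branches on one global dict) by structural recursion: per-head row
-- counting merged with the recursive tail result (objective: alternative).


-- ===== PORT A =====
-- itertools.combinations(xs, 2), pairs in lexicographic order
def pvComb2 : List Int → List (Int × Int)
  | [] => []
  | x :: xs => (xs.map (fun y => (x, y))) ++ pvComb2 xs

def frequency_distance_repeat (tuples : List (String × Int)) : List (Int × Int) :=
  -- distancias built by appending tuples[i][1] one by one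
  let distancias : List Int := tuples.foldl (fun acc t => acc ++ [t.2]) []
  let comb := pvComb2 distancias
  let frequency_len : PySem.Dict Int Int :=
    comb.foldl (fun d i =>
      let g : Int := (Int.gcd i.1 i.2 : Int)   -- math.gcd: nonneg gcd of absolute values
      if ¬ d.contains g = true ∧ 1 < g then d.insert g 1
      else if 1 < g then
        -- in this branch g is provably a key of d, so the Python lookup d[g] cannot
        -- raise; getD is exact here
        d.insert g (d.getD g 0 + 1)
      else d) PySem.Dict.empty
  frequency_len.items

-- ===== PORT B =====
-- row[g] = row.get(g, 0) + c
def pvAddc (d : PySem.Dict Int Int) (g c : Int) : PySem.Dict Int Int :=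
  d.insert g (d.getD g 0 + c)

-- 'for g, c in r.items(): row[g] = row.get(g, 0) + c'
def pvAddAll (d r : PySem.Dict Int Int) : PySem.Dict Int Int :=
  r.items.foldl (fun d p => pvAddc d p.1 p.2) d

-- the inner 'for y in rest' counting loop
def pvRowDict (x : Int) (rest : List Int) : PySem.Dict Int Int :=
  rest.foldl (fun d y =>
    let g : Int := (Int.gcd x y : Int)
    if 1 < g then pvAddc d g 1 else d) PySem.Dict.empty

def pvFreqs : List Int → PySem.Dict Int Int
  | [] => PySem.Dict.empty
  | [_] => PySem.Dict.empty
  | x :: rest => pvAddAll (pvRowDict x rest) (pvFreqs rest)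

def frequency_distance_repeat_alt (tuples : List (String × Int)) : List (Int × Int) :=
  (pvFreqs (tuples.map (fun t => t.2))).items

-- ===== PRECONDITION & SPEC =====
def Spec_frequency_distance_repeat (tuples : List (String × Int)) (out : List (Int × Int)) : Prop := out = frequency_distance_repeat_alt tuples
instance (tuples : List (String × Int)) (out : List (Int × Int)) : Decidable (Spec_frequency_distance_repeat tuples out) := by unfold Spec_frequency_distance_repeat; infer_instance

-- ===== CLAIM (what is proved, stated in full; the proofs are below) =====
def Claim_equal_frequency_distance_repeat : Prop := ∀ (tuples : List (String × Int)), Dom_frequency_distance_repeat tuples → Spec_frequency_distance_repeat tuples (frequency_distance_repeat tuples)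

-- ===== LEMMAS AND PROOFS =====

-- the gcd stream both programs count, filtered to the values that are recorded
def pvG : List Int → List Int :=
  fun ds => ((pvComb2 ds).map (fun p => (Int.gcd p.1 p.2 : Int))).filter (fun g => decide (1 < g))

theorem pv_foldl_append_snd (l : List (String × Int)) (acc : List Int) :
    l.foldl (fun acc t => acc ++ [t.2]) acc = acc ++ l.map (fun t => t.2) := by
  induction l generalizing acc with
  | nil => simp
  | cons h t ih => simp [List.foldl_cons, ih, List.append_assoc]

-- A's step, after resolving the membership branches, is the counter step on g > 1
theorem pvA_step_eq (d : PySem.Dict Int Int) (g : Int) :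
    (if ¬ d.contains g = true ∧ 1 < g then d.insert g 1
     else if 1 < g then d.insert g (d.getD g 0 + 1) else d)
    = (if 1 < g then d.insert g (d.getD g 0 + 1) else d) := by
  by_cases hc : d.contains g = true
  · simp [hc]
  · by_cases hg : (1:Int) < g
    · have h0 : d.getD g 0 = 0 :=
        PySem.Dict.getD_of_not_contains d 0 (by simpa using hc)
      simp [hc, hg, h0]
    · simp [hc, hg]

theorem pv_foldl_funext {α β : Type} (f g : α → β → α) (h : ∀ a b, f a b = g a b)
    (l : List β) (a : α) : l.foldl f a = l.foldl g a := by
  have : f = g := funext fun a => funext fun b => h a b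
  rw [this]

-- a conditional counter fold is the plain counter fold over the filtered stream
theorem pv_fold_filter (s : List Int) (d : PySem.Dict Int Int) :
    s.foldl (fun d g => if 1 < g then d.insert g (d.getD g 0 + 1) else d) d
    = (s.filter (fun g => decide (1 < g))).foldl
        (fun d g => d.insert g (d.getD g 0 + 1)) d := by
  induction s generalizing d with
  | nil => rfl
  | cons h t ih =>
    by_cases hg : (1:Int) < h
    · simp only [List.foldl_cons, List.filter_cons, hg, if_pos, decide_true]
      rw [ih]
    · simp only [List.foldl_cons, List.filter_cons, hg, decide_false]
      simpa [hg] using ih _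

-- summing fold over an explicit item list
theorem pv_addAll_getD (l : List (Int × Int)) (d : PySem.Dict Int Int) (k : Int) :
    (l.foldl (fun d p => pvAddc d p.1 p.2) d).getD k 0
    = d.getD k 0 + (((l.filter (fun p => p.1 == k)).map (fun p => p.2)).sum) := by
  induction l generalizing d with
  | nil => simp
  | cons p t ih =>
    obtain ⟨a, b⟩ := p
    rw [List.foldl_cons, ih]
    by_cases hk : a = k
    · subst hk
      rw [pvAddc, PySem.Dict.getD_insert_self]
      simp
      ring
    · rw [pvAddc, PySem.Dict.getD_insert_of_ne d _ _ (Ne.symm hk)]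
      simp [hk]

theorem pv_addAll_counter_getD (d : PySem.Dict Int Int) (v : List Int) (k : Int) :
    (pvAddAll d (PySem.Dict.counter v)).getD k 0 = d.getD k 0 + v.count k := by
  rw [pvAddAll, pv_addAll_getD, PySem.Dict.items_counter]
  congr 1
  rw [List.filter_map]
  have hfe : List.filter ((fun p => p.1 == k) ∘ fun k' => (k', (List.count k' v : Int)))
        (PySem.Set.ofList v)
      = List.filter (fun x => x == k) (PySem.Set.ofList v) := rfl
  rw [hfe, List.filter_beq]
  by_cases hk : k ∈ v
  · have h1 : List.count k (PySem.Set.ofList v) = 1 :=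
      List.count_eq_one_of_mem (PySem.Set.nodup_ofList v)
        ((PySem.Set.mem_ofList v k).mpr hk)
    simp [h1]
  · have h0 : List.count k (PySem.Set.ofList v) = 0 :=
      List.count_eq_zero_of_not_mem (fun hm => hk ((PySem.Set.mem_ofList v k).mp hm))
    have h0' : List.count k v = 0 := List.count_eq_zero_of_not_mem hk
    simp [h0, h0']

theorem pv_addAll_keys (d r : PySem.Dict Int Int) :
    (pvAddAll d r).keys = PySem.Set.update d.keys (r.items.map (fun p => p.1)) := by
  show (r.items.foldl (fun d p => d.insert p.1 (d.getD p.1 0 + p.2)) d).keys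
      = PySem.Set.update d.keys (r.items.map (fun p => p.1))
  exact PySem.Dict.keys_foldl_insert_key r.items (fun p => p.1) _ d

theorem pv_addAll_nodup (d r : PySem.Dict Int Int) (h : d.keys.Nodup) :
    (pvAddAll d r).keys.Nodup := by
  show (r.items.foldl (fun d p => d.insert p.1 (d.getD p.1 0 + p.2)) d).keys.Nodup
  exact PySem.Dict.nodup_keys_foldl_insert_key r.items (fun p => p.1) _ d h

theorem pv_set_update_ofList (s : PySem.Set Int) (v : List Int) :
    PySem.Set.update s (PySem.Set.ofList v) = PySem.Set.update s v := by
  rw [PySem.Set.update_eq_append_filter, PySem.Set.update_eq_append_filter,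
      PySem.Set.ofList_ofList]

-- merging two counters counts the concatenation
theorem pv_addAll_counters (u v : List Int) :
    pvAddAll (PySem.Dict.counter u) (PySem.Dict.counter v)
    = PySem.Dict.counter (u ++ v) := by
  apply PySem.Dict.ext
  have hnd : (pvAddAll (PySem.Dict.counter u) (PySem.Dict.counter v)).keys.Nodup :=
    pv_addAll_nodup _ _ (by rw [PySem.Dict.keys_counter]; exact PySem.Set.nodup_ofList u)
  rw [PySem.Dict.items_eq_map_keys _ hnd (0:Int),
      PySem.Dict.items_eq_map_keys _ (by rw [PySem.Dict.keys_counter]; exact PySem.Set.nodup_ofList (u ++ v)) (0:Int)]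
  have hkeys : (pvAddAll (PySem.Dict.counter u) (PySem.Dict.counter v)).keys
      = (PySem.Dict.counter (u ++ v)).keys := by
    rw [pv_addAll_keys, PySem.Dict.keys_counter, PySem.Dict.keys_counter]
    have : (PySem.Dict.counter v).items.map (fun p => p.1) = (PySem.Dict.counter v).keys := rfl
    rw [this, PySem.Dict.keys_counter, PySem.Set.ofList_append, pv_set_update_ofList]
  rw [hkeys]
  apply List.map_congr_left
  intro k _
  simp only [Prod.mk.injEq, true_and]
  rw [pv_addAll_counter_getD, PySem.Dict.getD_counter, PySem.Dict.getD_counter]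
  push_cast [List.count_append]
  ring

-- the row loop is a counter of its filtered gcd row
theorem pv_rowDict_eq (x : Int) (rest : List Int) :
    pvRowDict x rest
    = PySem.Dict.counter ((rest.map (fun y => (Int.gcd x y : Int))).filter
        (fun g => decide (1 < g))) := by
  rw [← PySem.Dict.foldl_insert_getD_add_one_eq_counter, ← pv_fold_filter, List.foldl_map]
  exact pv_foldl_funext _ _
    (fun d y => by
      show (if 1 < ((Int.gcd x y : Nat) : Int) then pvAddc d _ 1 else d) = _
      rw [pvAddc]) rest PySem.Dict.empty

-- the gcd stream of x :: rest is x's row followed by the stream of rest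
theorem pvG_cons (x : Int) (rest : List Int) :
    pvG (x :: rest)
    = (rest.map (fun y => (Int.gcd x y : Int))).filter (fun g => decide (1 < g))
        ++ pvG rest := by
  simp [pvG, pvComb2, List.filter_append, List.map_map, Function.comp_def]

-- B computes the counter of the whole filtered gcd stream
theorem pv_freqs_eq (ds : List Int) : pvFreqs ds = PySem.Dict.counter (pvG ds) := by
  induction ds with
  | nil => rfl
  | cons x rest ih =>
    cases rest with
    | nil => rfl
    | cons y t =>
      rw [show pvFreqs (x :: y :: t) = pvAddAll (pvRowDict x (y :: t)) (pvFreqs (y :: t))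
            from rfl,
          ih, pv_rowDict_eq, pv_addAll_counters, ← pvG_cons]

-- A's fold over the combinations list is the counter of the same stream
theorem pvA_fold (ds : List Int) :
    (pvComb2 ds).foldl (fun d i =>
      let g : Int := (Int.gcd i.1 i.2 : Int)
      if ¬ d.contains g = true ∧ 1 < g then d.insert g 1
      else if 1 < g then d.insert g (d.getD g 0 + 1) else d) PySem.Dict.empty
    = PySem.Dict.counter (pvG ds) := by
  rw [← PySem.Dict.foldl_insert_getD_add_one_eq_counter, pvG, ← pv_fold_filter,
      List.foldl_map]
  exact pv_foldl_funext _ _ (fun d i => pvA_step_eq d _) _ _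

-- ===== VERDICT (by name: the statement is the Claim_ definition above) =====
theorem frequency_distance_repeat_spec : Claim_equal_frequency_distance_repeat := by
  intro tuples _
  show frequency_distance_repeat tuples = frequency_distance_repeat_alt tuples
  simp only [frequency_distance_repeat, frequency_distance_repeat_alt,
    pv_foldl_append_snd, List.nil_append, pvA_fold, pv_freqs_eq]
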